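-- pv_equiv track=rewrite | github.com/yaminikrishna95/data-structures-algorithms | TwoPointers/meregsortedarray.py | mergeArray_brute
-- ===== SOURCE A (Python) =====
-- from typing import List
--
-- def mergeArray_brute(nums1: List[int], m: int, nums2: List[int], n: int) -> None:
--     """
--     Do not return anything, modify nums1 in-place instead.
--     """
--     merged_array=[]
--
--     for i in range(len(nums1)):
--         if nums1[i] > 0:
--            merged_array.append(nums1[i])
--     for j in range(len(nums2)):
--         if nums2[j] > 0:
--            merged_array.append(nums2[j])
--     merged_array.sort()
--     return merged_array
-- ===== SOURCE B (Python) =====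
-- from typing import List
--
-- def _insert_sorted(out: List[int], x: int) -> None:
--     # insert x into the ascending list `out` just after its last element <= x
--     lo, hi = 0, len(out)
--     while lo < hi:
--         mid = (lo + hi) // 2
--         if out[mid] <= x:
--             lo = mid + 1
--         else:
--             hi = mid
--     out.insert(lo, x)
--
-- def mergeArray_brute(nums1: List[int], m: int, nums2: List[int], n: int) -> List[int]:
--     out: List[int] = []
--     for x in nums1 + nums2:
--         if x > 0:
--             _insert_sorted(out, x)
--     return out
-- ===== Notes on version B (the rewrite author's own statement) =====
-- stated objective: alternative
-- what changed: A filters the positives of both lists into one buffer and then calls sort; B makes a single pass over nums1+nums2 maintaining an always-sorted accumulator, inserting each positive at the point found by a hand-written binary search, with no sort call.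
import Mathlib
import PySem

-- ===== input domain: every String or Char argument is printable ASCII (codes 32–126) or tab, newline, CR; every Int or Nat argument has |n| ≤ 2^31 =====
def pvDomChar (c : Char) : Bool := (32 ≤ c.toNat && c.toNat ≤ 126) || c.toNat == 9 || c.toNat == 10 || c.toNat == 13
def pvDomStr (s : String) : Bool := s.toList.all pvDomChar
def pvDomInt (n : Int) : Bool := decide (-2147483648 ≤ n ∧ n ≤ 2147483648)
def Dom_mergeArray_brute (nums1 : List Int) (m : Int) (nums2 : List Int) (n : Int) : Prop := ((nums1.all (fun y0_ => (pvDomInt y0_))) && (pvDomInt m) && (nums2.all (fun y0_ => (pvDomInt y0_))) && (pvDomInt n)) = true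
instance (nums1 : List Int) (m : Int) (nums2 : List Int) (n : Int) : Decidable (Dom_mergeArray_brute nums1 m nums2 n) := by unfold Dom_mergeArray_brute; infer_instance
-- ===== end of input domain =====

-- B replaces A's filter-then-sort by a single pass with ordered insertion into a sorted
-- accumulator (alternative algorithm, no sort call). A returns a fresh list and does not
-- mutate nums1 despite its docstring; the equivalence is about the returned value.

-- ===== PORT A =====
-- for i in range(len(nums1)): if nums1[i] > 0: merged_array.append(nums1[i]); same for nums2; then sort
def mergeArray_brute (nums1 : List Int) (m : Int) (nums2 : List Int) (n : Int) : List Int :=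
  let merged1 :=
    (PySem.List.pyRange 0 (PySem.List.len nums1) 1).foldl
      (fun acc i => if PySem.List.pyGetD nums1 i 0 > 0 then acc ++ [PySem.List.pyGetD nums1 i 0] else acc) []
  let merged2 :=
    (PySem.List.pyRange 0 (PySem.List.len nums2) 1).foldl
      (fun acc j => if PySem.List.pyGetD nums2 j 0 > 0 then acc ++ [PySem.List.pyGetD nums2 j 0] else acc) merged1
  PySem.List.sorted merged2 (fun x => x) false

-- ===== PORT B =====
-- the while-loop of _insert_sorted: binary search for the insertion point (after the last element <= x)
def bsr (out : List Int) (x : Int) (lo hi : Nat) : Nat :=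
  if lo < hi then
    if PySem.List.pyGetD out (((lo + hi) / 2 : Nat) : Int) 0 ≤ x then bsr out x ((lo + hi) / 2 + 1) hi
    else bsr out x lo ((lo + hi) / 2)
  else lo
termination_by hi - lo
decreasing_by all_goals omega

def mergeArray_brute_alt (nums1 : List Int) (m : Int) (nums2 : List Int) (n : Int) : List Int :=
  (nums1 ++ nums2).foldl
    (fun out x => if x > 0 then PySem.List.insert out ((bsr out x 0 out.length : Nat) : Int) x else out) []

-- ===== PRECONDITION & SPEC =====
def Spec_mergeArray_brute (nums1 : List Int) (m : Int) (nums2 : List Int) (n : Int) (out : List Int) : Prop := out = mergeArray_brute_alt nums1 m nums2 n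
instance (nums1 : List Int) (m : Int) (nums2 : List Int) (n : Int) (out : List Int) : Decidable (Spec_mergeArray_brute nums1 m nums2 n out) := by unfold Spec_mergeArray_brute; infer_instance

-- ===== CLAIM (what is proved, stated in full; the proofs are below) =====
def Claim_equal_mergeArray_brute : Prop := ∀ (nums1 : List Int) (m : Int) (nums2 : List Int) (n : Int), Dom_mergeArray_brute nums1 m nums2 n → Spec_mergeArray_brute nums1 m nums2 n (mergeArray_brute nums1 m nums2 n)

-- ===== LEMMAS AND PROOFS =====

-- the ordered-insertion step, as a structural recursion: the bridge between the two programs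
def insAsc (x : Int) : List Int → List Int
  | [] => [x]
  | y :: ys => if y > x then x :: y :: ys else y :: insAsc x ys

theorem insAsc_perm (x : Int) (l : List Int) : (insAsc x l).Perm (x :: l) := by
  induction l with
  | nil => simp [insAsc]
  | cons y ys ih =>
    simp only [insAsc]
    split_ifs with h
    · exact List.Perm.refl _
    · exact (ih.cons y).trans (List.Perm.swap x y ys)

theorem mem_insAsc {z x : Int} {l : List Int} (h : z ∈ insAsc x l) : z = x ∨ z ∈ l := by
  have := (insAsc_perm x l).mem_iff.mp h
  simpa using this

theorem insAsc_pairwise {x : Int} {l : List Int} (h : l.Pairwise (· ≤ ·)) :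
    (insAsc x l).Pairwise (· ≤ ·) := by
  induction l with
  | nil => simp [insAsc]
  | cons y ys ih =>
    rcases List.pairwise_cons.mp h with ⟨hy, hys⟩
    simp only [insAsc]
    split_ifs with hgt
    · refine List.pairwise_cons.mpr ⟨?_, h⟩
      intro z hz
      rcases List.mem_cons.mp hz with rfl | hz
      · omega
      · exact le_trans (le_of_lt hgt) (hy z hz)
    · refine List.pairwise_cons.mpr ⟨?_, ih hys⟩
      intro z hz
      rcases mem_insAsc hz with rfl | hz
      · omega
      · exact hy z hz

-- bsr on a sorted list returns the index splitting the ≤-x prefix from the >-x suffix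
theorem bsr_spec (l : List Int) (x : Int) (hs : l.Pairwise (· ≤ ·)) (d : Nat) :
    ∀ lo hi, hi - lo = d → lo ≤ hi → hi ≤ l.length →
    (∀ i (h : i < l.length), i < lo → l[i] ≤ x) →
    (∀ i (h : i < l.length), hi ≤ i → x < l[i]) →
    (∀ i (h : i < l.length), i < bsr l x lo hi → l[i] ≤ x) ∧
    (∀ i (h : i < l.length), bsr l x lo hi ≤ i → x < l[i]) ∧ bsr l x lo hi ≤ l.length := by
  have hmono : ∀ i j (hj : j < l.length) (hij : i ≤ j), l[i]'(by omega) ≤ l[j] := by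
    intro i j hj hij
    rcases Nat.lt_or_ge i j with h | h
    · exact List.pairwise_iff_getElem.mp hs i j (by omega) hj h
    · have : i = j := by omega
      subst this; exact le_rfl
  induction d using Nat.strong_induction_on with
  | _ d ih =>
    intro lo hi hd hlh hhl h1 h2
    rw [bsr]
    by_cases hlt : lo < hi
    · have hmid : (lo + hi) / 2 < l.length := by omega
      rw [if_pos hlt, PySem.List.pyGetD_natCast, List.getD_eq_getElem l 0 hmid]
      by_cases hc : l[(lo + hi) / 2] ≤ x
      · rw [if_pos hc]
        refine ih (hi - ((lo + hi) / 2 + 1)) (by omega) _ _ rfl (by omega) hhl ?_ h2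
        intro i h hi'
        exact le_trans (hmono i ((lo + hi) / 2) hmid (by omega)) hc
      · rw [if_neg hc]
        refine ih ((lo + hi) / 2 - lo) (by omega) _ _ rfl (by omega) (by omega) h1 ?_
        intro i h hi'
        exact lt_of_lt_of_le (lt_of_not_ge hc) (hmono ((lo + hi) / 2) i h hi')
    · rw [if_neg hlt]
      exact ⟨fun i h hi' => h1 i h hi', fun i h hi' => h2 i h (by omega), by omega⟩

-- inserting at the split index is exactly the left-to-right ordered insertion
theorem insAsc_eq_take_drop (l : List Int) (x : Int) : ∀ (k : Nat), k ≤ l.length →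
    (∀ i (h : i < l.length), i < k → l[i] ≤ x) →
    (∀ i (h : i < l.length), k ≤ i → x < l[i]) →
    insAsc x l = l.take k ++ x :: l.drop k := by
  induction l with
  | nil =>
    intro k hk _ _
    have hk0 : k = 0 := by simpa using hk
    subst hk0; simp [insAsc]
  | cons y ys ih =>
    intro k hk h1 h2
    cases k with
    | zero =>
      have hxy : x < y := h2 0 (by simp) (by omega)
      simp [insAsc, show y > x from hxy]
    | succ k' =>
      have hy : y ≤ x := h1 0 (by simp) (by omega)
      simp only [insAsc, show ¬ y > x by omega, if_neg, not_false_iff,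
        List.take_succ_cons, List.drop_succ_cons, List.cons_append, List.cons.injEq, true_and]
      exact ih k' (by simpa using hk)
        (fun i h hi' => by simpa using h1 (i + 1) (by simpa using Nat.succ_lt_succ h) (by omega))
        (fun i h hi' => by simpa using h2 (i + 1) (by simpa using Nat.succ_lt_succ h) (by omega))

theorem binsert_eq_insAsc (l : List Int) (x : Int) (hs : l.Pairwise (· ≤ ·)) :
    PySem.List.insert l ((bsr l x 0 l.length : Nat) : Int) x = insAsc x l := by
  obtain ⟨h1, h2, hle⟩ :=
    bsr_spec l x hs l.length 0 l.length rfl (by omega) le_rfl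
      (fun i h hi' => by omega) (fun i h hi' => by omega)
  rw [PySem.List.insert_natCast l _ x hle, insAsc_eq_take_drop l x _ hle h1 h2]

theorem foldl_ins_perm (l : List Int) (acc : List Int) :
    (l.foldl (fun acc x => if x > 0 then insAsc x acc else acc) acc).Perm
      (acc ++ l.filter (fun x => decide (x > 0))) := by
  induction l generalizing acc with
  | nil => simp
  | cons y ys ih =>
    simp only [List.foldl_cons, List.filter_cons]
    by_cases h : y > 0
    · simp only [h, if_pos, decide_true]
      refine (ih (insAsc y acc)).trans ?_
      exact (((insAsc_perm y acc).append_right _).trans List.perm_middle.symm)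
    · simp only [h, if_neg, not_false_iff, decide_false]
      simpa using ih acc

theorem foldl_ins_pairwise (l : List Int) (acc : List Int) (h : acc.Pairwise (· ≤ ·)) :
    (l.foldl (fun acc x => if x > 0 then insAsc x acc else acc) acc).Pairwise (· ≤ ·) := by
  induction l generalizing acc with
  | nil => simpa using h
  | cons y ys ih =>
    simp only [List.foldl_cons]
    by_cases hy : y > 0
    · simpa [hy] using ih _ (insAsc_pairwise h)
    · simpa [hy] using ih _ h

-- B's loop is the insAsc loop, as long as the accumulator stays sorted (which it does)
theorem foldl_binsert_eq (l : List Int) (acc : List Int) (h : acc.Pairwise (· ≤ ·)) :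
    l.foldl (fun out x => if x > 0 then PySem.List.insert out ((bsr out x 0 out.length : Nat) : Int) x else out) acc
      = l.foldl (fun acc x => if x > 0 then insAsc x acc else acc) acc := by
  induction l generalizing acc with
  | nil => rfl
  | cons y ys ih =>
    simp only [List.foldl_cons]
    by_cases hy : y > 0
    · rw [if_pos hy, if_pos hy, binsert_eq_insAsc acc y h]
      exact ih _ (insAsc_pairwise h)
    · rw [if_neg hy, if_neg hy]
      exact ih _ h

-- ===== VERDICT (by name: the statement is the Claim_ definition above) =====
theorem mergeArray_brute_spec : Claim_equal_mergeArray_brute := by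
  intro nums1 m nums2 n _
  simp only [Spec_mergeArray_brute, mergeArray_brute, mergeArray_brute_alt]
  rw [PySem.List.foldl_pyRange_zero_pyGetD nums1 0
        (fun acc v => if v > 0 then acc ++ [v] else acc) [],
      PySem.List.foldl_pyRange_zero_pyGetD nums2 0
        (fun acc v => if v > 0 then acc ++ [v] else acc) _,
      PySem.List.foldl_append_ite_eq_filter, PySem.List.foldl_append_ite_eq_filter,
      foldl_binsert_eq _ _ (by simp)]
  apply PySem.List.sorted_id_eq_of_perm_of_pairwise
  · refine (foldl_ins_perm _ _).trans ?_
    simp [List.filter_append]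
  · exact foldl_ins_pairwise _ _ (by simp)
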